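-- pv_equiv track=rewrite | github.com/nikachaduneli/Binary-Systems | ნიკა ჩადუნელი, ჯგუფი 1, დავალება 2.2.py | decimal_to_sign_magn
-- ===== SOURCE A (Python) =====
-- def decimal_to_sign_magn(num: int, bit_num: int=4) -> str:
--
--     if abs(num) > 2**(bit_num-1):
--         return 'not enough bits to display result'
--
--     if num == 0:return '0'* bit_num, '1'+'0'*bit_num-1
--     result = ['0']* bit_num
--     result[-1] = '1' if num < 0 else '0'  #determine first bit of final result
--     num = abs(num)
--
--     for i in range(len(result)-1):
--         result[i] = str(num %2)
--         num//=2
--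
--     return ''.join(result[::-1])
-- ===== SOURCE B (Python) =====
-- def decimal_to_sign_magn(num: int, bit_num: int=4) -> str:
--     if bit_num < 1 or abs(num) >= 2**(bit_num-1):
--         return 'not enough bits to display result'
--     sign = '1' if num < 0 else '0'
--     return sign + format(abs(num), '0{}b'.format(bit_num - 1))
-- ===== Notes on version B (the rewrite author's own statement) =====
-- stated objective: idiomatic
-- what changed: Replaces A's mutable bit-list, LSB-first remainder loop and final reversal with a closed-form zero-padded binary format call prefixed by the sign character (the conversion runs in C instead of an interpreted per-bit loop), and rejects magnitudes that do not fit in bit_num-1 bits with >= instead of >.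
-- intended difference: On inputs with |num| == 2**(bit_num-1) (e.g. (8,4)) A's '>' guard admits the number but its loop silently truncates the magnitude to bit_num-1 bits, returning the representation of 0 (e.g. '0000'); B returns 'not enough bits to display result', the intended answer since the magnitude does not fit in bit_num-1 sign-magnitude bits. — e.g. on decimal_to_sign_magn(8, 4): A returns "0000", B returns "not enough bits to display result"
import Mathlib
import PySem

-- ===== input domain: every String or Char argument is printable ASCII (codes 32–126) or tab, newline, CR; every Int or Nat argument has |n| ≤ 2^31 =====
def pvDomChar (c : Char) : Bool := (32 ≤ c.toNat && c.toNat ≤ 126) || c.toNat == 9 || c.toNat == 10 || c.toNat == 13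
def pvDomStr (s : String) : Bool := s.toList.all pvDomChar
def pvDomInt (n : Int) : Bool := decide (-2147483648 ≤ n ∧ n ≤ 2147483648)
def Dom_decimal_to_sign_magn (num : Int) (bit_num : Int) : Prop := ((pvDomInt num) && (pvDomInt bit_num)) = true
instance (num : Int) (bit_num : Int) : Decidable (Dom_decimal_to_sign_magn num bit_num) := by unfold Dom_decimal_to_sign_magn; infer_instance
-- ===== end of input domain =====

-- B replaces A's mutable bit-list, LSB-first remainder loop and final reversal with a sign character
-- plus one zero-padded binary format call (idiomatic); on |num| = 2^(bit_num-1) (D_ below) B returns the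
-- error message where A silently truncates the magnitude.


-- ===== PORT A =====
-- one iteration of "for i in range(len(result)-1): result[i] = str(num % 2); num //= 2"
def aStep (st : List String × Int) (i : Nat) : List String × Int :=
  (st.1.set i (PySem.Int.toStr (PySem.Int.mod st.2 2)), PySem.Int.floordiv st.2 2)

def decimal_to_sign_magn (num : Int) (bit_num : Int) : String :=
  -- guard "abs(num) > 2**(bit_num-1)": for bit_num ≤ 0 Python's 2**(bit_num-1) is a FLOAT in (0, 1/2],
  -- so on an integer num the guard holds exactly when num ≠ 0; the case split ports it exactly.
  if (1 ≤ bit_num ∧ (2:Int) ^ (bit_num - 1).toNat < |num|) ∨ (bit_num < 1 ∧ num ≠ 0) then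
    "not enough bits to display result"
  else if num = 0 then
    ""  -- Python: "return '0'*bit_num, '1'+'0'*bit_num-1" raises TypeError here; excluded by Pre_
  else
    let result := List.replicate bit_num.toNat "0"               -- result = ['0']*bit_num
    let result := PySem.List.pySetD result (-1)
        (if num < 0 then "1" else "0")                           -- result[-1] = '1' if num < 0 else '0'
    let st := (List.range (result.length - 1)).foldl aStep (result, |num|)
    PySem.Str.join "" st.1.reverse                               -- ''.join(result[::-1]) ; [::-1] is reverse

-- ===== PORT B =====
-- binary digits of m, most significant first ([] for 0): the digits format(m,'b') prints for m ≥ 1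
def binCore : Nat → List Char
  | 0 => []
  | m+1 => binCore ((m+1)/2) ++ [if (m+1) % 2 = 1 then '1' else '0']
decreasing_by exact Nat.div_lt_self (Nat.succ_pos m) one_lt_two

-- format(m, '0{w}b'); exact for m ≥ 0 (the only values abs(num) produces)
def pyFormat0b (m w : Nat) : List Char :=
  let s := if m = 0 then ['0'] else binCore m
  List.replicate (w - s.length) '0' ++ s

def decimal_to_sign_magn_alt (num : Int) (bit_num : Int) : String :=
  if bit_num < 1 ∨ (2:Int) ^ (bit_num - 1).toNat ≤ |num| then
    "not enough bits to display result"
  else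
    -- sign + format(abs(num), '0{}b'.format(bit_num-1))
    String.ofList ((if num < 0 then ['1'] else ['0']) ++ pyFormat0b |num|.toNat (bit_num - 1).toNat)

-- ===== PRECONDITION & SPEC =====
-- Pre_ excludes num = 0, on which A always raises TypeError ("'1'+'0'*bit_num-1" subtracts an int from a str).
def Pre_decimal_to_sign_magn (num : Int) (bit_num : Int) : Prop := num ≠ 0
instance (num : Int) (bit_num : Int) : Decidable (Pre_decimal_to_sign_magn num bit_num) := by unfold Pre_decimal_to_sign_magn; infer_instance
def pvWitness_decimal_to_sign_magn : Int × Int := (3, 4)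

-- On |num| = 2^(bit_num-1) A's '>' guard admits num but its loop keeps only bit_num-1 low bits, returning
-- the representation of 0; B returns the error message, the intended answer since the magnitude does not fit.
def D_decimal_to_sign_magn (num : Int) (bit_num : Int) : Prop :=
  1 ≤ bit_num ∧ num.natAbs = 2 ^ (bit_num.toNat - 1)
instance (num : Int) (bit_num : Int) : Decidable (D_decimal_to_sign_magn num bit_num) := by unfold D_decimal_to_sign_magn; infer_instance

def Spec_decimal_to_sign_magn (num : Int) (bit_num : Int) (out : String) : Prop :=
  ¬ D_decimal_to_sign_magn num bit_num → out = decimal_to_sign_magn_alt num bit_num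
instance (num : Int) (bit_num : Int) (out : String) : Decidable (Spec_decimal_to_sign_magn num bit_num out) := by unfold Spec_decimal_to_sign_magn; infer_instance

def pvDiffWitness_decimal_to_sign_magn : Int × Int := (8, 4)
def pvDiffWitnessOut_decimal_to_sign_magn : String × String := ("0000", "not enough bits to display result")

-- ===== CLAIM (what is proved, stated in full; the proofs are below) =====
def Claim_unchanged_decimal_to_sign_magn : Prop := ∀ (num : Int) (bit_num : Int), Dom_decimal_to_sign_magn num bit_num → Pre_decimal_to_sign_magn num bit_num → Spec_decimal_to_sign_magn num bit_num (decimal_to_sign_magn num bit_num)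
def Claim_changed_decimal_to_sign_magn : Prop := Dom_decimal_to_sign_magn (pvDiffWitness_decimal_to_sign_magn.1) (pvDiffWitness_decimal_to_sign_magn.2) ∧ Pre_decimal_to_sign_magn (pvDiffWitness_decimal_to_sign_magn.1) (pvDiffWitness_decimal_to_sign_magn.2) ∧ D_decimal_to_sign_magn (pvDiffWitness_decimal_to_sign_magn.1) (pvDiffWitness_decimal_to_sign_magn.2) ∧ decimal_to_sign_magn (pvDiffWitness_decimal_to_sign_magn.1) (pvDiffWitness_decimal_to_sign_magn.2) = pvDiffWitnessOut_decimal_to_sign_magn.1 ∧ decimal_to_sign_magn_alt (pvDiffWitness_decimal_to_sign_magn.1) (pvDiffWitness_decimal_to_sign_magn.2) = pvDiffWitnessOut_decimal_to_sign_magn.2 ∧ pvDiffWitnessOut_decimal_to_sign_magn.1 ≠ pvDiffWitnessOut_decimal_to_sign_magn.2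
def Claim_exact_decimal_to_sign_magn : Prop := ∀ (num : Int) (bit_num : Int), Dom_decimal_to_sign_magn num bit_num → Pre_decimal_to_sign_magn num bit_num → D_decimal_to_sign_magn num bit_num → decimal_to_sign_magn num bit_num ≠ decimal_to_sign_magn_alt num bit_num
-- ===== LEMMAS AND PROOFS =====
-- LSB-first bits, as the strings A's loop writes
def strBits : Int → Nat → List String
  | _, 0 => []
  | n, j+1 => PySem.Int.toStr (PySem.Int.mod n 2) :: strBits (PySem.Int.floordiv n 2) j

def halves : Int → Nat → Int
  | n, 0 => n
  | n, j+1 => halves (PySem.Int.floordiv n 2) j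

-- LSB-first bits of a Nat, as chars
def charBits : Nat → Nat → List Char
  | _, 0 => []
  | m, j+1 => (if m % 2 = 1 then '1' else '0') :: charBits (m/2) j

lemma strBits_length (n : Int) (j : Nat) : (strBits n j).length = j := by
  induction j generalizing n with
  | zero => rfl
  | succ j ih => simp [strBits, ih]

lemma halves_succ (n : Int) (j : Nat) :
    halves n (j+1) = PySem.Int.floordiv (halves n j) 2 := by
  induction j generalizing n with
  | zero => rfl
  | succ j ih => rw [show halves n (j+2) = halves (PySem.Int.floordiv n 2) (j+1) from rfl, ih]; rfl

lemma strBits_snoc (n : Int) (j : Nat) :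
    strBits n (j+1) = strBits n j ++ [PySem.Int.toStr (PySem.Int.mod (halves n j) 2)] := by
  induction j generalizing n with
  | zero => rfl
  | succ j ih =>
    rw [show strBits n (j+2) = PySem.Int.toStr (PySem.Int.mod n 2) :: strBits (PySem.Int.floordiv n 2) (j+1) from rfl, ih]
    rfl

lemma loop_spec (j : Nat) (res : List String) (n : Int) (h : j ≤ res.length) :
    (List.range j).foldl aStep (res, n) = (strBits n j ++ res.drop j, halves n j) := by
  induction j with
  | zero => simp [strBits, halves]
  | succ j ih =>
    rw [List.range_succ, List.foldl_append, ih (by omega)]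
    have hj : j < res.length := by omega
    simp only [List.foldl_cons, List.foldl_nil, aStep]
    rw [List.drop_eq_getElem_cons hj, Prod.mk.injEq]
    refine ⟨?_, ?_⟩
    · have hset : (strBits n j ++ res[j] :: res.drop (j+1)).set j
          (PySem.Int.toStr (PySem.Int.mod (halves n j) 2))
          = strBits n j ++ (PySem.Int.toStr (PySem.Int.mod (halves n j) 2)) :: res.drop (j+1) := by
        have hl := strBits_length n j
        rw [List.set_append]
        simp [hl]
        rw [List.drop_eq_getElem_cons hj]
        rfl
      rw [hset, strBits_snoc]
      simp
    · rw [halves_succ]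

lemma charBits_zero (j : Nat) : charBits 0 j = List.replicate j '0' := by
  induction j with
  | zero => rfl
  | succ j ih => simp [charBits, ih, List.replicate_succ]

lemma strBits_natCast (m : Nat) (j : Nat) :
    strBits (m : Int) j = (charBits m j).map (fun c => String.ofList [c]) := by
  induction j generalizing m with
  | zero => rfl
  | succ j ih =>
    rw [show strBits (m : Int) (j+1)
        = PySem.Int.toStr (PySem.Int.mod (m : Int) 2) :: strBits (PySem.Int.floordiv (m : Int) 2) j from rfl]
    rw [show ((2:Int)) = ((2:Nat):Int) from rfl, PySem.Int.mod_natCast, PySem.Int.floordiv_natCast, ih]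
    rcases Nat.mod_two_eq_zero_or_one m with h | h <;> simp [charBits, h] <;> decide

lemma binCore_pos (m : Nat) (hm : 1 ≤ m) :
    binCore m = binCore (m/2) ++ [if m % 2 = 1 then '1' else '0'] := by
  cases m with
  | zero => omega
  | succ m => rw [binCore]

-- the reversed LSB-first bits are exactly the zero-padded binary digits, when m fits in j bits
lemma charBits_reverse (j : Nat) : ∀ m : Nat, 1 ≤ m → m < 2^j →
    (charBits m j).reverse = List.replicate (j - (binCore m).length) '0' ++ binCore m := by
  induction j with
  | zero => intro m h1 h2; omega
  | succ j ih =>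
    intro m h1 h2
    rw [show charBits m (j+1) = (if m % 2 = 1 then '1' else '0') :: charBits (m/2) j from rfl]
    simp only [List.reverse_cons]
    by_cases hm : m / 2 = 0
    · -- m = 1
      have hm1 : m = 1 := by omega
      subst hm1
      rw [charBits_zero, binCore_pos 1 (by omega)]
      norm_num
      rw [show binCore 0 = [] from by rw [binCore]]
      simp
    · have h1' : 1 ≤ m / 2 := by omega
      have h2' : m / 2 < 2^j := by
        have : m < 2^j * 2 := by rw [pow_succ] at h2; omega
        omega
      rw [ih (m/2) h1' h2', binCore_pos m h1]
      simp only [List.length_append, List.length_cons, List.length_nil, List.append_assoc]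
      congr 2
      omega

lemma pySetD_neg_one {α : Type} (xs : List α) (v : α) (h : xs ≠ []) :
    PySem.List.pySetD xs (-1) v = xs.set (xs.length - 1) v := by
  simp only [PySem.List.pySetD, PySem.List.pySet?]
  have hi : PySem.List.pyIdx? xs.length (-1) = some (xs.length - 1) := by
    simp [PySem.List.pyIdx?, h]
  rw [hi]
  rfl

lemma join_singletons (cs : List Char) :
    PySem.Str.join "" (cs.map (fun c => String.ofList [c])) = String.ofList cs := by
  apply String.toList_inj.mp
  rw [PySem.Str.toList_join]
  simp only [List.map_map, Function.comp_def, String.toList_ofList]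
  exact PySem.Chars.join_nil_singletons cs

-- value of A on the non-error, non-zero branch
lemma A_value (num bit_num : Int) (h1 : 1 ≤ bit_num) (h0 : num ≠ 0)
    (hle : ¬ ((2:Int) ^ (bit_num - 1).toNat < |num|)) :
    decimal_to_sign_magn num bit_num
      = String.ofList ((if num < 0 then '1' else '0') :: (charBits |num|.toNat (bit_num - 1).toNat).reverse) := by
  have hk : 1 ≤ bit_num.toNat := by omega
  unfold decimal_to_sign_magn
  rw [if_neg (by rintro (⟨_, hlt⟩ | ⟨hlt, _⟩)
                 exacts [hle hlt, by omega]), if_neg h0]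
  dsimp only
  have hne : List.replicate bit_num.toNat "0" ≠ [] := by
    simp only [ne_eq, List.replicate_eq_nil_iff]; omega
  rw [pySetD_neg_one _ _ hne, List.length_replicate]
  have hrep : (List.replicate bit_num.toNat "0").set (bit_num.toNat - 1) (if num < 0 then "1" else "0")
      = List.replicate (bit_num.toNat - 1) "0" ++ [if num < 0 then "1" else "0"] := by
    conv_lhs => rw [show bit_num.toNat = (bit_num.toNat - 1) + 1 from by omega, List.replicate_succ']
    rw [List.set_append]
    simp
  rw [hrep]
  have hlen : (List.replicate (bit_num.toNat - 1) "0" ++ [if num < 0 then "1" else "0"]).length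
      = bit_num.toNat := by simp; omega
  rw [hlen]
  rw [loop_spec (bit_num.toNat - 1) _ |num| (by rw [hlen]; omega)]
  rw [List.drop_left' (by simp)]
  have habs : |num| = ((|num|.toNat : Nat) : Int) := (Int.toNat_of_nonneg (abs_nonneg num)).symm
  rw [habs, strBits_natCast]
  have hj : bit_num.toNat - 1 = (bit_num - 1).toNat := by omega
  rw [hj]
  have hsgn : (if num < 0 then "1" else "0")
      = String.ofList [if num < 0 then '1' else '0'] := by
    by_cases h : num < 0 <;> simp [h]
  rw [hsgn]
  rw [show (List.map (fun c => String.ofList [c]) (charBits |num|.toNat (bit_num - 1).toNat)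
        ++ [String.ofList [if num < 0 then '1' else '0']]).reverse
      = List.map (fun c => String.ofList [c])
          ((if num < 0 then '1' else '0') :: (charBits |num|.toNat (bit_num - 1).toNat).reverse) from by
    simp [List.map_reverse]]
  exact join_singletons _

-- value of B on the non-error branch
lemma B_value (num bit_num : Int) (h1 : 1 ≤ bit_num) (hlt : |num| < (2:Int) ^ (bit_num - 1).toNat) :
    decimal_to_sign_magn_alt num bit_num
      = String.ofList ((if num < 0 then '1' else '0') :: pyFormat0b |num|.toNat (bit_num - 1).toNat) := by
  unfold decimal_to_sign_magn_alt
  rw [if_neg (by rintro (h | h)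
                 exacts [by omega, absurd hlt (not_lt.mpr h)])]
  by_cases h : num < 0 <;> simp [h]

-- ===== VERDICT (by name: the statement is the Claim_ definition above) =====
theorem decimal_to_sign_magn_spec : Claim_unchanged_decimal_to_sign_magn := by
  intro num bit_num hdom hpre hnd
  have hp0 : num ≠ 0 := hpre
  by_cases hb : 1 ≤ bit_num
  · rcases lt_trichotomy |num| ((2:Int) ^ (bit_num - 1).toNat) with hlt | heq | hgt
    · rw [A_value num bit_num hb hp0 (by omega), B_value num bit_num hb hlt]
      have hm1 : 1 ≤ |num|.toNat := by
        have := abs_pos.mpr hp0; omega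
      have hmw : |num|.toNat < 2 ^ (bit_num - 1).toNat := by
        have h2 : ((2:Int) ^ (bit_num - 1).toNat) = ((2 ^ (bit_num - 1).toNat : Nat) : Int) := by
          push_cast; ring
        rw [h2] at hlt
        omega
      congr 1
      congr 1
      rw [charBits_reverse _ _ hm1 hmw]
      unfold pyFormat0b
      dsimp only
      rw [if_neg (by omega)]
    · refine absurd ⟨hb, ?_⟩ hnd
      have he : bit_num.toNat - 1 = (bit_num - 1).toNat := by omega
      rw [he]
      rw [Int.abs_eq_natAbs] at heq
      exact_mod_cast heq
    · unfold decimal_to_sign_magn decimal_to_sign_magn_alt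
      rw [if_pos (Or.inl ⟨hb, hgt⟩), if_pos (Or.inr (le_of_lt hgt))]
  · unfold decimal_to_sign_magn decimal_to_sign_magn_alt
    rw [if_pos (Or.inr ⟨by omega, hp0⟩), if_pos (Or.inl (by omega))]

theorem decimal_to_sign_magn_changed : Claim_changed_decimal_to_sign_magn := by
  unfold Claim_changed_decimal_to_sign_magn; decide

theorem decimal_to_sign_magn_tight : Claim_exact_decimal_to_sign_magn := by
  intro num bit_num hdom hpre hD
  obtain ⟨hb, heq⟩ := hD
  have hp0 : num ≠ 0 := hpre
  have heqInt : |num| = (2:Int) ^ (bit_num - 1).toNat := by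
    have he : bit_num.toNat - 1 = (bit_num - 1).toNat := by omega
    rw [he] at heq
    rw [Int.abs_eq_natAbs]
    exact_mod_cast heq
  rw [A_value num bit_num hb hp0 (by omega)]
  unfold decimal_to_sign_magn_alt
  rw [if_pos (Or.inr (le_of_eq heqInt.symm))]
  intro hcontra
  have hlist := congrArg String.toList hcontra
  rw [String.toList_ofList,
      show ("not enough bits to display result").toList
        = 'n' :: "ot enough bits to display result".toList from rfl] at hlist
  by_cases h : num < 0 <;> simp [h] at hlist
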